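-- pv_equiv track=rewrite | github.com/lo-tp/leetcode | dp/788RotatedDigits.py | convert
-- ===== SOURCE A (Python) =====
-- from math import floor
--
-- mapping = {0: 0, 1: 1, 8: 8, 2: 5, 5: 2, 6: 9, 9: 6}
--
-- def convert(num: int):
--     res = 0
--     base = 1
--     while num:
--         t = num % 10
--         if t in mapping:
--             res += base * mapping[t]
--             num = floor(num / 10)
--             base *= 10
--         else:
--             res = -1
--             break
--     return res
-- ===== SOURCE B (Python) =====
-- mapping = {0: 0, 1: 1, 8: 8, 2: 5, 5: 2, 6: 9, 9: 6}
--
-- def convert(num: int):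
--     if num == 0:
--         return 0
--     rest = convert(num // 10)
--     d = mapping.get(num % 10)
--     if rest == -1 or d is None:
--         return -1
--     return rest * 10 + d
-- ===== Notes on version B (the rewrite author's own statement) =====
-- stated objective: simpler
-- what changed: Replaces A's while-loop with res/base accumulators (least-significant-first reconstruction via growing powers of ten) by a direct recursion on the input shorn of its last digit, rebuilding the rotated number most-significant-first with a single multiply-accumulate, and using dict.get instead of a membership test plus lookup; Pre_ excludes negative inputs, where B's recursion never bottoms out (A there either loops forever or returns the failure sentinel on hitting a non-rotatable digit).
-- outside the precondition, e.g. on convert(-43): A returns -1, B raises RecursionError; on convert(-25): A returns -1, B raises RecursionError; on convert(-1): A does not finish within the time limit, B raises RecursionError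
import Mathlib
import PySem

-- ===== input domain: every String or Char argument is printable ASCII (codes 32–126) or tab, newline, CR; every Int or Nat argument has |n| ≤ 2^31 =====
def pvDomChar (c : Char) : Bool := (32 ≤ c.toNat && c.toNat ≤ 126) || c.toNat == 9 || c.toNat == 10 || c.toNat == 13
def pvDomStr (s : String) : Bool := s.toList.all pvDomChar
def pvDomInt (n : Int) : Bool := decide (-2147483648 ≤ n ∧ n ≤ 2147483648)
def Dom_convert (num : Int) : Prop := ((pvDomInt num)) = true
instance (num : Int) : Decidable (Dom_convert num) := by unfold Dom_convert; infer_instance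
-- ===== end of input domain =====

-- B replaces A's while-loop with res/base accumulators by a most-significant-first recursion
-- on num // 10 with a single multiply-accumulate (objective: simpler).

-- ===== PORT A =====
-- mapping = {0: 0, 1: 1, 8: 8, 2: 5, 5: 2, 6: 9, 9: 6}
def pvMapping : PySem.Dict Int Int :=
  ⟨[(0, 0), (1, 1), (8, 8), (2, 5), (5, 2), (6, 9), (9, 6)]⟩

-- the while-loop of A over state (num, res, base); Python's floor(num / 10) equals
-- floordiv for |num| ≤ 2^31.  The 'num ≠ -1' guard is for totality only: num = -1 is the
-- loop's unique fixed point (floor(-1/10) = -1 with digit 9 mapped), where the Python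
-- loop never terminates (excluded by Pre_convert).
def convertLoop (num res base : Int) : Int :=
  if num = 0 then res
  else
    let t := PySem.Int.mod num 10
    match PySem.Dict.get? pvMapping t with
    | some m =>
      if h : num ≠ -1 then
        convertLoop (PySem.Int.floordiv num 10) (res + base * m) (base * 10)
      else res
    | none => -1
termination_by num.natAbs
decreasing_by
  have hq := PySem.Int.floordiv_mul_add_mod num 10
  have h1 := PySem.Int.mod_nonneg num (by omega : (0:Int) < 10)
  have h2 := PySem.Int.mod_lt num (by omega : (0:Int) < 10)
  omega

def convert (num : Int) : Int := convertLoop num 0 1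

-- ===== PORT B =====
-- recursion on num // 10; the final 'else -1' branch is a totality guard only: for
-- num < 0 the Python recursion never reaches the base case (excluded by Pre_convert).
def convert_alt (num : Int) : Int :=
  if num = 0 then 0
  else if h : 0 < num then
    let rest := convert_alt (PySem.Int.floordiv num 10)
    match PySem.Dict.get? pvMapping (PySem.Int.mod num 10) with
    | none => -1
    | some d => if rest = -1 then -1 else rest * 10 + d
  else -1
termination_by num.toNat
decreasing_by
  rw [PySem.Int.floordiv_eq_ediv_of_pos (by omega : (0:Int) < 10)]
  omega

-- ===== PRECONDITION & SPEC =====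
-- Pre_ excludes negative inputs: B's recursion never reaches its base case there and
-- raises RecursionError, while A either loops forever (num floor-divided by 10 gets stuck
-- at -1 once every remaining digit is rotatable) or returns -1 on hitting a non-rotatable
-- digit.
def Pre_convert (num : Int) : Prop := 0 ≤ num
instance (num : Int) : Decidable (Pre_convert num) := by unfold Pre_convert; infer_instance

def pvWitness_convert : Int := 2569

def Spec_convert (num : Int) (out : Int) : Prop := out = convert_alt num
instance (num : Int) (out : Int) : Decidable (Spec_convert num out) := by unfold Spec_convert; infer_instance

-- ===== CLAIM (what is proved, stated in full; the proofs are below) =====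
def Claim_equal_convert : Prop := ∀ (num : Int), Dom_convert num → Pre_convert num → Spec_convert num (convert num)

-- ===== LEMMAS AND PROOFS =====

-- the seven-entry literal dict, evaluated at each possible digit
theorem pvGet_0 : PySem.Dict.get? pvMapping 0 = some 0 := by decide
theorem pvGet_1 : PySem.Dict.get? pvMapping 1 = some 1 := by decide
theorem pvGet_2 : PySem.Dict.get? pvMapping 2 = some 5 := by decide
theorem pvGet_3 : PySem.Dict.get? pvMapping 3 = none := by decide
theorem pvGet_4 : PySem.Dict.get? pvMapping 4 = none := by decide
theorem pvGet_5 : PySem.Dict.get? pvMapping 5 = some 2 := by decide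
theorem pvGet_6 : PySem.Dict.get? pvMapping 6 = some 9 := by decide
theorem pvGet_7 : PySem.Dict.get? pvMapping 7 = none := by decide
theorem pvGet_8 : PySem.Dict.get? pvMapping 8 = some 8 := by decide
theorem pvGet_9 : PySem.Dict.get? pvMapping 9 = some 6 := by decide

-- B's result is never below -1 on nonnegative input.
theorem convert_alt_lb (num : Int) (h : 0 ≤ num) :
    convert_alt num = -1 ∨ 0 ≤ convert_alt num := by
  by_cases h0 : num = 0
  · subst h0; right; simp [convert_alt]
  · have hpos : 0 < num := by omega
    have hrec : 0 ≤ PySem.Int.floordiv num 10 := by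
      rw [PySem.Int.floordiv_eq_ediv_of_pos (by omega : (0:Int) < 10)]; omega
    have ih := convert_alt_lb (PySem.Int.floordiv num 10) hrec
    rw [convert_alt]
    simp only [h0, if_false, hpos, dif_pos]
    set fd := PySem.Int.floordiv num 10 with hfd
    have ht1 : 0 ≤ PySem.Int.mod num 10 := PySem.Int.mod_nonneg num (by omega)
    have ht2 : PySem.Int.mod num 10 < 10 := PySem.Int.mod_lt num (by omega)
    set t := PySem.Int.mod num 10 with htdef
    interval_cases t <;>
      simp only [pvGet_0, pvGet_1, pvGet_2, pvGet_3, pvGet_4, pvGet_5, pvGet_6, pvGet_7, pvGet_8, pvGet_9] <;>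
      first
        | (left; decide)
        | (rcases ih with ih | ih <;> simp [ih] <;> omega)
termination_by num.toNat
decreasing_by
  rw [PySem.Int.floordiv_eq_ediv_of_pos (by omega : (0:Int) < 10)]
  omega

-- Loop invariant: A's loop from state (num, res, base) computes res + base * (rotated num),
-- or -1 if some digit of num is not rotatable — i.e. if convert_alt num = -1.
theorem convertLoop_eq (num res base : Int) (h : 0 ≤ num) :
    convertLoop num res base =
      if convert_alt num = -1 then -1 else res + base * convert_alt num := by
  by_cases h0 : num = 0
  · subst h0
    rw [convertLoop]
    simp [convert_alt]
  · have hpos : 0 < num := by omega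
    have hrec : 0 ≤ PySem.Int.floordiv num 10 := by
      rw [PySem.Int.floordiv_eq_ediv_of_pos (by omega : (0:Int) < 10)]; omega
    have ih := fun res base => convertLoop_eq (PySem.Int.floordiv num 10) res base hrec
    have hlb := convert_alt_lb (PySem.Int.floordiv num 10) hrec
    have hne1 : num ≠ -1 := by omega
    rw [convertLoop, convert_alt]
    simp only [h0, if_false, hpos, hne1, ne_eq, not_false_eq_true, dif_pos]
    set fd := PySem.Int.floordiv num 10 with hfd
    have ht1 : 0 ≤ PySem.Int.mod num 10 := PySem.Int.mod_nonneg num (by omega)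
    have ht2 : PySem.Int.mod num 10 < 10 := PySem.Int.mod_lt num (by omega)
    set t := PySem.Int.mod num 10 with htdef
    interval_cases t <;>
      simp only [pvGet_0, pvGet_1, pvGet_2, pvGet_3, pvGet_4, pvGet_5, pvGet_6, pvGet_7, pvGet_8, pvGet_9] <;>
      first
        | rfl
        | (rw [ih]
           rcases hlb with hlb | hlb
           · simp [hlb]
           · set r := convert_alt (PySem.Int.floordiv num 10) with hr
             have hne : ¬ (r = -1) := by omega
             simp only [hne, if_false]
             split_ifs with hbad
             · omega
             · ring)
termination_by num.toNat
decreasing_by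
  rw [PySem.Int.floordiv_eq_ediv_of_pos (by omega : (0:Int) < 10)]
  omega

-- ===== VERDICT (by name: the statement is the Claim_ definition above) =====
theorem convert_spec : Claim_equal_convert := by
  intro num _ hpre
  unfold Spec_convert convert
  rw [convertLoop_eq num 0 1 hpre]
  split_ifs with h1
  · omega
  · ring
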